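-- pv_equiv track=rewrite | github.com/felixbade/minecraft-proxy | app/client/varint.py | check_encoded
-- ===== SOURCE A (Python) =====
-- def check_encoded(varint):
--     if len(varint) == 0:
--         return False
--     if varint[-1] & 0x80 != 0:
--         return False
--     for byte in varint[:-1]:
--         if byte & 0x80 == 0:
--             return False
--     return True
-- ===== SOURCE B (Python) =====
-- def check_encoded(varint):
--     if not varint:
--         return False
--     if len(varint) == 1:
--         return varint[0] & 0x80 == 0
--     return varint[0] & 0x80 != 0 and check_encoded(varint[1:])
-- ===== Notes on version B (the rewrite author's own statement) =====
-- stated objective: alternative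
-- what changed: Replaces A's iterative three-part check (empty guard, explicit last-byte test via varint[-1], loop over the varint[:-1] slice) with structural recursion on the list: a singleton must be a terminator, otherwise the head must be a continuation byte and the tail must itself be well-encoded.
import Mathlib
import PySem

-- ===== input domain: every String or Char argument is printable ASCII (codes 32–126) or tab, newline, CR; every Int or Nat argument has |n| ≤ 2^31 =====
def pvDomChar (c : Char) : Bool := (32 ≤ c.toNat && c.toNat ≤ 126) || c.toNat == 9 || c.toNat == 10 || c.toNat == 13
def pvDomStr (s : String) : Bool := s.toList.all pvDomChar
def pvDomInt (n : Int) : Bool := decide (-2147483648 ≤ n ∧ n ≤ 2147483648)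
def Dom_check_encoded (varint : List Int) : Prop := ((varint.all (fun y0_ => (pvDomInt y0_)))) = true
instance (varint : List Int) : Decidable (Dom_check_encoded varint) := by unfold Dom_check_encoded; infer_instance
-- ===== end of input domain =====

-- B re-derives the check by structural recursion on the list (singleton = terminator,
-- otherwise head is a continuation byte and the tail is well-encoded), replacing A's
-- iterative empty-guard / last-byte / prefix-loop structure (alternative decomposition).


-- ===== PORT A =====
-- 'for byte in varint[:-1]: if byte & 0x80 == 0: return False' / 'return True'
def check_encoded_loop : List Int → Bool
  | [] => true
  | b :: rest => if PySem.Int.band b 128 = 0 then false else check_encoded_loop rest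

def check_encoded (varint : List Int) : Bool :=
  if varint.length = 0 then false
  else if PySem.Int.band (PySem.List.pyGetD varint (-1) 0) 128 ≠ 0 then false
  else check_encoded_loop (PySem.List.slice varint none (some (-1)))

-- ===== PORT B =====
-- structural recursion: empty → False; singleton → terminator test; cons → continuation head AND recurse on tail
def check_encoded_alt : List Int → Bool
  | [] => false
  | [b] => decide (PySem.Int.band b 128 = 0)
  | b :: c :: rest => (!decide (PySem.Int.band b 128 = 0)) && check_encoded_alt (c :: rest)

-- ===== PRECONDITION & SPEC =====
def Spec_check_encoded (varint : List Int) (out : Bool) : Prop := out = check_encoded_alt varint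
instance (varint : List Int) (out : Bool) : Decidable (Spec_check_encoded varint out) := by unfold Spec_check_encoded; infer_instance

-- ===== CLAIM (what is proved, stated in full; the proofs are below) =====
def Claim_equal_check_encoded : Prop := ∀ (varint : List Int), Dom_check_encoded varint → Spec_check_encoded varint (check_encoded varint)

-- ===== LEMMAS AND PROOFS =====

theorem a_eq_alt (xs : List Int) : check_encoded xs = check_encoded_alt xs := by
  induction xs with
  | nil => simp [check_encoded, check_encoded_alt]
  | cons b rest ih =>
    cases rest with
    | nil =>
      by_cases hb : PySem.Int.band b 128 = 0 <;>
        simp [check_encoded, check_encoded_alt, PySem.List.pyGetD_neg_one (xs := [b]) (h := by simp),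
              PySem.List.slice_to_neg_one, check_encoded_loop, hb]
    | cons c rs =>
      simp only [check_encoded, check_encoded_alt] at ih ⊢
      have hne1 : (b :: c :: rs : List Int) ≠ [] := by simp
      have hne2 : (c :: rs : List Int) ≠ [] := by simp
      rw [PySem.List.pyGetD_neg_one (h := hne1), PySem.List.slice_to_neg_one]
      rw [PySem.List.pyGetD_neg_one (h := hne2), PySem.List.slice_to_neg_one] at ih
      simp only [List.getLast_cons hne2, List.dropLast_cons_of_ne_nil hne2,
        check_encoded_loop]
      simp only [List.length_cons, if_neg (by omega : ¬ (rs.length + 1 + 1 = 0))] at *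
      simp only [if_neg (by omega : ¬ (rs.length + 1 = 0))] at ih
      by_cases hlast : PySem.Int.band ((c :: rs).getLast hne2) 128 ≠ 0
      · simp [hlast] at ih ⊢
        simp [← ih]
      · simp [hlast] at ih ⊢
        by_cases hb : PySem.Int.band b 128 = 0 <;> simp [hb, ih]

-- ===== VERDICT (by name: the statement is the Claim_ definition above) =====
theorem check_encoded_spec : Claim_equal_check_encoded := by
  intro varint _
  unfold Spec_check_encoded
  rw [a_eq_alt]
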